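-- pv_equiv track=rewrite | github.com/iparedes/Bugs-FCM | cell.py | von_neumann_pos
-- ===== SOURCE A (Python) =====
-- def von_neumann_pos(dist):
--     N=[]
--     for dr in range(-dist,dist+1):
--         if dr<=0:
--             a=dr+dist
--         else:
--             a=dist-dr
--         for dc in range(-a,a+1):
--             N.append([dr,dc])
--     N.remove([0,0])
--     return N
-- ===== SOURCE B (Python) =====
-- def von_neumann_pos(dist):
--     # Mirror-symmetry construction: build the rows above the origin, the middle
--     # row without the origin, then reflect the top rows to get the bottom half.
--     top = [[[dr, dc] for dc in range(-(dist + dr), dist + dr + 1)]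
--            for dr in range(-dist, 0)]
--     mid = [[0, dc] for dc in range(-dist, dist + 1) if dc != 0]
--     bottom = [[-dr, dc] for row in reversed(top) for dr, dc in row]
--     return [p for row in top for p in row] + mid + bottom
-- ===== Notes on version B (the rewrite author's own statement) =====
-- stated objective: alternative
-- what changed: Instead of scanning all rows and deleting the origin afterwards with remove, B builds only the top half of the diamond row by row, builds the middle row with the origin skipped, and obtains the bottom half by reflecting the reversed top rows (dr -> -dr), concatenating the three parts.
import Mathlib
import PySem

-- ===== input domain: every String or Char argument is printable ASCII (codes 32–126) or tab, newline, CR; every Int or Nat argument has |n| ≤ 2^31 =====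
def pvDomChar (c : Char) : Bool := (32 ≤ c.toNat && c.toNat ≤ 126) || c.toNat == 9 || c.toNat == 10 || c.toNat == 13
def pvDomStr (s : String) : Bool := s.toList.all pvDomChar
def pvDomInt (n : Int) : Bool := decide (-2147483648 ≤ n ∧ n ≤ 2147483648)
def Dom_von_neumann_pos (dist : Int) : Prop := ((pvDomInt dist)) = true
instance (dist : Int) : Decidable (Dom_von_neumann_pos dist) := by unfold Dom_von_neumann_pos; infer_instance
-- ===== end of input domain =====

-- B builds the top half of the diamond, the middle row with the origin skipped, and the
-- bottom half by reflecting the reversed top rows — no trailing remove (alternative).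

-- ===== PORT A =====
def von_neumann_pos (dist : Int) : List (List Int) :=
  let N : List (List Int) :=
    (PySem.List.pyRange (-dist) (dist + 1) 1).foldl
      (fun N dr =>
        let a : Int := if dr ≤ 0 then dr + dist else dist - dr
        (PySem.List.pyRange (-a) (a + 1) 1).foldl (fun N dc => N ++ [[dr, dc]]) N)
      []
  -- N.remove([0,0]) raises ValueError when [0,0] ∉ N (dist < 0); Pre_ excludes that
  (PySem.List.remove? N [0, 0]).getD []

-- ===== PORT B =====
def von_neumann_pos_alt (dist : Int) : List (List Int) :=
  let top : List (List (List Int)) :=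
    (PySem.List.pyRange (-dist) 0 1).map (fun dr =>
      (PySem.List.pyRange (-(dist + dr)) (dist + dr + 1) 1).map (fun dc => [dr, dc]))
  let mid : List (List Int) :=
    ((PySem.List.pyRange (-dist) (dist + 1) 1).filter (fun dc => dc != 0)).map
      (fun dc => [0, dc])
  let bottom : List (List Int) :=
    top.reverse.flatMap (fun row => row.map (fun p =>
      -- Python's 'for dr, dc in row': every p here is a two-element list [dr, dc]
      match p with
      | [dr, dc] => [-dr, dc]
      | _ => []))
  top.flatMap id ++ mid ++ bottom

-- ===== PRECONDITION & SPEC =====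
-- Pre_ excludes dist < 0, where A's N.remove([0,0]) raises ValueError (N is empty there).
def Pre_von_neumann_pos (dist : Int) : Prop := 0 ≤ dist
instance (dist : Int) : Decidable (Pre_von_neumann_pos dist) := by unfold Pre_von_neumann_pos; infer_instance
def pvWitness_von_neumann_pos : Int := 2

def Spec_von_neumann_pos (dist : Int) (out : List (List Int)) : Prop := out = von_neumann_pos_alt dist
instance (dist : Int) (out : List (List Int)) : Decidable (Spec_von_neumann_pos dist out) := by unfold Spec_von_neumann_pos; infer_instance

-- ===== CLAIM (what is proved, stated in full; the proofs are below) =====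
def Claim_equal_von_neumann_pos : Prop := ∀ (dist : Int), Dom_von_neumann_pos dist → Pre_von_neumann_pos dist → Spec_von_neumann_pos dist (von_neumann_pos dist)

-- ===== LEMMAS AND PROOFS =====

-- canonical row: the dc-sweep A performs for a given dr
def vnRow (dist dr : Int) : List (List Int) :=
  (PySem.List.pyRange (-(dist - |dr|)) ((dist - |dr|) + 1) 1).map (fun dc => [dr, dc])

-- A's accumulated list is the flatMap of rows
lemma a_flat (dist : Int) :
    von_neumann_pos dist =
      (PySem.List.remove?
        ((PySem.List.pyRange (-dist) (dist + 1) 1).flatMap (vnRow dist)) [0, 0]).getD [] := by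
  unfold von_neumann_pos
  simp only [PySem.List.foldl_append_singleton_eq_map, PySem.List.foldl_append_eq_flatMap,
    List.nil_append]
  congr 2
  refine List.flatMap_congr (fun dr hdr => ?_)
  rw [PySem.List.mem_pyRange_one] at hdr
  unfold vnRow
  have : (if dr ≤ 0 then dr + dist else dist - dr) = dist - |dr| := by
    rcases abs_cases dr with ⟨h, _⟩ | ⟨h, _⟩ <;> split_ifs <;> omega
  rw [this]

-- reversing an increasing unit range and negating gives the mirrored range
lemma reverse_neg_range (a b : Int) :
    (PySem.List.pyRange a b 1).reverse = (PySem.List.pyRange (1 - b) (1 - a) 1).map Neg.neg := by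
  rcases le_or_gt b a with h | h
  · rw [PySem.List.pyRange_one_eq_nil h, PySem.List.pyRange_one_eq_nil (by omega)]
    simp
  · have hlen : (b - a).toNat = ((1 - a) - (1 - b)).toNat := by omega
    apply List.ext_getElem
    · simp [PySem.List.length_pyRange_one, hlen]
    · intro k hk1 hk2
      have hk : k < (b - a).toNat := by
        simpa [PySem.List.length_pyRange_one] using hk1
      rw [List.getElem_reverse, List.getElem_map,
        PySem.List.getElem_pyRange_one, PySem.List.getElem_pyRange_one]
      simp only [PySem.List.length_pyRange_one] at *
      omega

lemma b_parts (dist : Int) :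
    von_neumann_pos_alt dist =
      (PySem.List.pyRange (-dist) 0 1).flatMap (vnRow dist)
      ++ ((PySem.List.pyRange (-dist) (dist + 1) 1).filter (fun dc => dc != 0)).map
            (fun dc => [0, dc])
      ++ (PySem.List.pyRange 1 (dist + 1) 1).flatMap (vnRow dist) := by
  unfold von_neumann_pos_alt
  simp only [List.flatMap_map, ← List.map_reverse, id_eq]
  congr 1
  congr 1
  -- top half
  · refine List.flatMap_congr (fun dr hdr => ?_)
    rw [PySem.List.mem_pyRange_one] at hdr
    unfold vnRow
    have : dist - |dr| = dist + dr := by rcases abs_cases dr with ⟨h1, _⟩ | ⟨h1, _⟩ <;> omega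
    rw [this]
  -- bottom half: reversed, negated top rows
  · rw [reverse_neg_range]
    have : (1 : Int) - 0 = 1 := by norm_num
    rw [show (1 : Int) - 0 = 1 from rfl, show (1 : Int) - -dist = dist + 1 by ring]
    rw [List.flatMap_map]
    refine List.flatMap_congr (fun dr hdr => ?_)
    rw [PySem.List.mem_pyRange_one] at hdr
    unfold vnRow
    simp only [List.map_map]
    have h1 : dist + -dr = dist - |dr| := by
      rcases abs_cases dr with ⟨h1, _⟩ | ⟨h1, _⟩ <;> omega
    rw [h1]
    refine List.map_congr_left (fun dc _ => ?_)
    simp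

-- the middle row with [0,0] erased is B's filtered middle row
lemma mid_erase (dist : Int) (h : 0 ≤ dist) :
    (vnRow dist 0).erase [0, 0] =
      ((PySem.List.pyRange (-dist) (dist + 1) 1).filter (fun dc => dc != 0)).map
        (fun dc => [0, dc]) := by
  unfold vnRow
  simp only [abs_zero, sub_zero]
  rw [PySem.List.pyRange_one_append (-dist) 0 (dist + 1) (by omega) (by omega),
      PySem.List.pyRange_one_cons (show (0:Int) < dist + 1 by omega)]
  rw [List.map_append, List.map_cons, List.filter_append, List.filter_cons, List.map_append]
  have hne : ∀ dc ∈ PySem.List.pyRange (-dist) 0 1, ([0, dc] : List Int) ≠ [0, 0] := by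
    intro dc hdc
    rw [PySem.List.mem_pyRange_one] at hdc
    simp; omega
  have hf1 : (PySem.List.pyRange (-dist) 0 1).filter (fun dc => dc != 0)
      = PySem.List.pyRange (-dist) 0 1 := by
    refine List.filter_eq_self.mpr (fun x hx => ?_)
    rw [PySem.List.mem_pyRange_one] at hx
    simp; omega
  have hf2 : (PySem.List.pyRange (0+1) (dist + 1) 1).filter (fun dc => dc != 0)
      = PySem.List.pyRange (0+1) (dist + 1) 1 := by
    refine List.filter_eq_self.mpr (fun x hx => ?_)
    rw [PySem.List.mem_pyRange_one] at hx
    simp; omega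
  rw [List.erase_append_right _ (by
    simp only [List.mem_map]
    rintro ⟨dc, hdc, hEq⟩
    exact hne dc hdc hEq)]
  rw [hf1, hf2]
  simp

lemma no_origin_flat (dist : Int) (a b : Int) (hb : b ≤ 0 ∨ 1 ≤ a) :
    [0, 0] ∉ (PySem.List.pyRange a b 1).flatMap (vnRow dist) := by
  simp only [List.mem_flatMap]
  rintro ⟨dr, hdr, hmem⟩
  rw [PySem.List.mem_pyRange_one] at hdr
  unfold vnRow at hmem
  simp only [List.mem_map] at hmem
  obtain ⟨dc, _, hEq⟩ := hmem
  simp only [List.cons.injEq, and_true] at hEq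
  omega

theorem von_neumann_pos_eq (dist : Int) (h : 0 ≤ dist) :
    von_neumann_pos dist = von_neumann_pos_alt dist := by
  rw [a_flat, b_parts dist]
  rw [PySem.List.pyRange_one_append (-dist) 0 (dist + 1) (by omega) (by omega),
      PySem.List.pyRange_one_cons (show (0:Int) < dist + 1 by omega)]
  rw [List.flatMap_append, List.flatMap_cons]
  have hmem : ([0, 0] : List Int) ∈ vnRow dist 0 := by
    unfold vnRow
    simp only [List.mem_map]
    exact ⟨0, by rw [PySem.List.mem_pyRange_one]; simp only [abs_zero]; omega, rfl⟩
  have hmemL : ([0, 0] : List Int) ∈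
      (PySem.List.pyRange (-dist) 0 1).flatMap (vnRow dist)
        ++ (vnRow dist 0 ++ (PySem.List.pyRange (0+1) (dist+1) 1).flatMap (vnRow dist)) := by
    simp [hmem]
  rw [PySem.List.remove?_eq_some_erase _ _ hmemL, Option.getD_some]
  rw [List.erase_append_right _ (no_origin_flat dist (-dist) 0 (Or.inl le_rfl)),
      List.erase_append_left _ hmem, mid_erase dist h]
  rw [PySem.List.pyRange_one_append (-dist) 0 (dist + 1) (by omega) (by omega),
      PySem.List.pyRange_one_cons (show (0:Int) < dist + 1 by omega),
      List.filter_append, List.filter_cons]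
  simp [List.append_assoc]

-- ===== VERDICT (by name: the statement is the Claim_ definition above) =====
theorem von_neumann_pos_spec : Claim_equal_von_neumann_pos := by
  intro dist _ hpre
  unfold Spec_von_neumann_pos
  exact von_neumann_pos_eq dist hpre
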